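-- pv_equiv track=rewrite | github.com/ziiiegen/Optimization-methods-birds- | src/utils/load_data_and_check.py | creation_dictionary_birds
-- ===== SOURCE A (Python) =====
-- def creation_dictionary_birds(prepared_arr_birds, set_birds_data):
--     """
--     Функция создает словарь, где ключ - птица, значение - ее количество на ветках
--     """
--     dict_birds = {}
--
--     for i in set_birds_data:
--         dict_birds[i] = 0
--     for i in prepared_arr_birds:
--         if i in set_birds_data:
--             dict_birds[i] += 1
--
--     return dict_birds
-- ===== SOURCE B (Python) =====
-- def creation_dictionary_birds(prepared_arr_birds, set_birds_data):
--     # sort a copy, count each run of equal birds in one scan, then project the allowed set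
--     srt = sorted(prepared_arr_birds)
--     counts = {}
--     i, n = 0, len(srt)
--     while i < n:
--         j = i + 1
--         while j < n and srt[j] == srt[i]:
--             j += 1
--         counts[srt[i]] = j - i
--         i = j
--     return {b: counts.get(b, 0) for b in set_birds_data}
-- ===== Notes on version B (the rewrite author's own statement) =====
-- stated objective: alternative
-- what changed: B sorts a copy of the array, counts each run of equal birds in one linear scan (no tally dict updated per element, no membership test while counting), and then projects the allowed set with counts.get(b, 0); A zero-initialises a dict over the set and increments per array element behind an in-set branch.
import Mathlib
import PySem

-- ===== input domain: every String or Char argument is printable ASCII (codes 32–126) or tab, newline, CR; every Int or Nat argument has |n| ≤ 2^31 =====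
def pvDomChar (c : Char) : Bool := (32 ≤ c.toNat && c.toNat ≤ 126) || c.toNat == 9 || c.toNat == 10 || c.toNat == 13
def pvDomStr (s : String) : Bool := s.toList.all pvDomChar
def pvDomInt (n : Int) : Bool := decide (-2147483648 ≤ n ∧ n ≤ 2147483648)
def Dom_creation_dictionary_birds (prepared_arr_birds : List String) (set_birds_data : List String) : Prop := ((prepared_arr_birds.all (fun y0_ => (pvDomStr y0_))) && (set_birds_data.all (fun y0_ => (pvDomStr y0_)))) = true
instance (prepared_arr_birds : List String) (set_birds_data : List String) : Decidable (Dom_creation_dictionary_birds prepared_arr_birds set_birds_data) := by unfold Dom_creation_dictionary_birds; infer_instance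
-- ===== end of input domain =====

-- B sorts a copy, counts runs of equal birds in one scan, then projects the allowed set; a sort-then-group alternative to A's per-element tally with an in-set branch.


-- ===== PORT A =====
-- zero-init loop over set_birds_data, then counting loop over prepared_arr_birds with an
-- in-set branch; 'dict_birds[i] += 1' ported as insert (getD … 0 + 1) — the key is always
-- present there (the first loop inserted every i ∈ set_birds_data), so the 0 default is never consulted.
def creation_dictionary_birds (prepared_arr_birds : List String) (set_birds_data : List String) : List (String × Int) :=
  let d0 : PySem.Dict String Int := set_birds_data.foldl (fun d i => d.insert i 0) PySem.Dict.empty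
  let d1 := prepared_arr_birds.foldl
    (fun d i => if i ∈ set_birds_data then d.insert i (d.getD i 0 + 1) else d) d0
  d1.items

-- ===== PORT B =====
-- srt = sorted(prepared_arr_birds); while i < n: scan the run of srt[i], counts[srt[i]] = j - i;
-- then {b: counts.get(b, 0) for b in set_birds_data}.  The index-based run scan is transliterated
-- as a recursion consuming the sorted list: the inner 'while srt[j] == srt[i]' is the takeWhile run.
def runCountsAux : List String → PySem.Dict String Int → PySem.Dict String Int
  | [], d => d
  | x :: rest, d =>
      runCountsAux (rest.drop (rest.takeWhile (fun y => y == x)).length)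
        (d.insert x (((rest.takeWhile (fun y => y == x)).length + 1 : Nat) : Int))
  termination_by l _ => l.length
  decreasing_by simp

def creation_dictionary_birds_alt (prepared_arr_birds : List String) (set_birds_data : List String) : List (String × Int) :=
  let counts := runCountsAux (PySem.List.sorted prepared_arr_birds (fun x => x) false) PySem.Dict.empty
  (set_birds_data.foldl (fun d b => d.insert b (counts.getD b 0)) PySem.Dict.empty).items

-- ===== PRECONDITION & SPEC =====
def Spec_creation_dictionary_birds (prepared_arr_birds : List String) (set_birds_data : List String) (out : List (String × Int)) : Prop := out = creation_dictionary_birds_alt prepared_arr_birds set_birds_data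
instance (prepared_arr_birds : List String) (set_birds_data : List String) (out : List (String × Int)) : Decidable (Spec_creation_dictionary_birds prepared_arr_birds set_birds_data out) := by unfold Spec_creation_dictionary_birds; infer_instance

-- ===== CLAIM (what is proved, stated in full; the proofs are below) =====
def Claim_equal_creation_dictionary_birds : Prop := ∀ (prepared_arr_birds : List String) (set_birds_data : List String), Dom_creation_dictionary_birds prepared_arr_birds set_birds_data → Spec_creation_dictionary_birds prepared_arr_birds set_birds_data (creation_dictionary_birds prepared_arr_birds set_birds_data)

-- ===== LEMMAS AND PROOFS =====

-- A's conditional counting loop is the unconditional one over the filtered list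
theorem foldl_if_filter (p s : List String) (d : PySem.Dict String Int) :
    p.foldl (fun d i => if i ∈ s then d.insert i (d.getD i 0 + 1) else d) d
      = (p.filter (fun i => decide (i ∈ s))).foldl (fun d i => d.insert i (d.getD i 0 + 1)) d := by
  rw [List.foldl_filter]
  simp

-- the zero-init dict: every lookup with default 0 is 0
theorem getD_foldl_insert_zero (s : List String) (d : PySem.Dict String Int) (k : String)
    (h : d.getD k 0 = 0) :
    (s.foldl (fun d i => d.insert i (0 : Int)) d).getD k 0 = 0 := by
  induction s generalizing d with
  | nil => simpa using h
  | cons a t ih =>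
      simp only [List.foldl_cons]
      exact ih _ (by rw [PySem.Dict.getD_insert]; split <;> simp [h])

-- a fold of inserts whose value depends only on the key (B's loop)
theorem getD_foldl_insert_keyfun (s : List String) (v : String → Int)
    (d : PySem.Dict String Int) (k : String) :
    (s.foldl (fun d b => d.insert b (v b)) d).getD k 0
      = if k ∈ s then v k else d.getD k 0 := by
  induction s generalizing d with
  | nil => simp
  | cons a t ih =>
      simp only [List.foldl_cons, ih, PySem.Dict.getD_insert]
      by_cases hk : k ∈ t
      · simp [hk]
      · by_cases hka : k = a <;> simp [hk, hka]

-- updating a set with elements it already contains is the identity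
theorem update_subset_eq (s : PySem.Set String) (xs : List String)
    (h : ∀ x ∈ xs, x ∈ s) : s.update xs = s := by
  rw [PySem.Set.update_eq_append_filter]
  have : (PySem.Set.ofList xs).filter (fun y => !s.contains y) = [] := by
    rw [List.filter_eq_nil_iff]
    intro y hy
    have : y ∈ s := h y ((PySem.Set.mem_ofList xs y).mp hy)
    simp [PySem.Set.contains, this]
  rw [this, List.append_nil]

theorem keys_A (p s : List String) :
    (p.foldl (fun d i => if i ∈ s then d.insert i (d.getD i 0 + 1) else d)
      (s.foldl (fun d i => d.insert i (0 : Int)) PySem.Dict.empty)).keys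
    = PySem.Set.ofList s := by
  rw [foldl_if_filter, PySem.Dict.keys_foldl_insert, PySem.Dict.keys_foldl_insert]
  rw [show (PySem.Dict.empty : PySem.Dict String Int).keys = ([] : List String) from rfl]
  rw [PySem.Set.update_nil_left]
  exact update_subset_eq _ _ (by
    intro x hx
    rw [PySem.Set.mem_ofList]
    exact (List.mem_filter.mp hx).2 |> of_decide_eq_true)

-- takeWhile/dropWhile facts for the run-length scan
theorem drop_takeWhile_length {α : Type} (p : α → Bool) (l : List α) :
    l.drop (l.takeWhile p).length = l.dropWhile p := by
  have h := List.drop_left (l₁ := l.takeWhile p) (l₂ := l.dropWhile p)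
  rwa [List.takeWhile_append_dropWhile] at h

theorem not_mem_dropWhile_beq (x : String) (l : List String)
    (h : ∀ y ∈ l, x ≤ y) (hp : l.Pairwise (· ≤ ·)) :
    x ∉ l.dropWhile (fun y => y == x) := by
  intro hx
  cases e : l.dropWhile (fun y => y == x) with
  | nil => rw [e] at hx; exact (List.not_mem_nil).elim hx
  | cons h0 tl =>
      have hne : ¬ (h0 == x) = true := by
        have := List.head_dropWhile_not (p := fun y => y == x) (l := l) (by rw [e]; simp)
        simpa [e] using this
      have hne' : h0 ≠ x := by simpa using hne
      rw [e] at hx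
      have hxtl : x ∈ tl := by
        rcases List.mem_cons.mp hx with h' | h'
        · exact absurd h'.symm hne'
        · exact h'
      have hsub : (l.dropWhile (fun y => y == x)).Sublist l := List.dropWhile_sublist _
      have hpw : (h0 :: tl).Pairwise (· ≤ ·) := by rw [← e]; exact hp.sublist hsub
      have h1 : h0 ≤ x := (List.pairwise_cons.mp hpw).1 x hxtl
      have h2 : x ≤ h0 := h h0 (hsub.mem (by rw [e]; exact List.mem_cons_self))
      exact hne' (le_antisymm h1 h2)

-- the run-length dict looks up to the count, for a (≤)-sorted list
theorem getD_runCountsAux : ∀ (n : Nat) (xs : List String), xs.length ≤ n →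
    xs.Pairwise (· ≤ ·) → ∀ (d : PySem.Dict String Int) (k : String),
    (runCountsAux xs d).getD k 0 = if k ∈ xs then (xs.count k : Int) else d.getD k 0 := by
  intro n
  induction n with
  | zero =>
      intro xs hlen _ d k
      have : xs = [] := List.eq_nil_of_length_eq_zero (Nat.le_zero.mp hlen)
      subst this; rw [runCountsAux.eq_1]; simp
  | succ m ih =>
      intro xs hlen hpw d k
      cases xs with
      | nil => rw [runCountsAux.eq_1]; simp
      | cons x rest =>
          rw [runCountsAux.eq_2]
          set t := rest.takeWhile (fun y => y == x) with ht
          have hdrop : rest.drop t.length = rest.dropWhile (fun y => y == x) :=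
            drop_takeWhile_length _ rest
          set r := rest.dropWhile (fun y => y == x) with hr
          have hxle : ∀ y ∈ rest, x ≤ y := (List.pairwise_cons.mp hpw).1
          have hpwr : rest.Pairwise (· ≤ ·) := (List.pairwise_cons.mp hpw).2
          have hxr : x ∉ r := not_mem_dropWhile_beq x rest hxle hpwr
          have hrest : t ++ r = rest := List.takeWhile_append_dropWhile
          have hlenr : r.length ≤ m := by
            have : t.length + r.length = rest.length := by
              rw [← List.length_append, hrest]
            simp at hlen; omega
          have hpwr' : r.Pairwise (· ≤ ·) := hpwr.sublist (List.dropWhile_sublist _)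
          have htall : ∀ y ∈ t, y = x := by
            intro y hy
            have := List.mem_takeWhile_imp hy
            simpa using this
          rw [hdrop, ih r hlenr hpwr']
          by_cases hkx : k = x
          · subst hkx
            have hkr : k ∉ r := hxr
            have hct : t.count k = t.length := by
              rw [List.count_eq_length]
              intro b hb; exact (htall b hb).symm
            have hcr : r.count k = 0 := List.count_eq_zero.mpr hkr
            have hcount : (k :: rest).count k = t.length + 1 := by
              rw [List.count_cons_self, ← hrest, List.count_append, hct, hcr]
            simp [hkr, hcount]
          · have hkt : k ∉ t := fun hk => hkx (htall k hk)
            have hmem : (k ∈ r) = (k ∈ x :: rest) := by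
              simp only [List.mem_cons, eq_iff_iff]
              constructor
              · intro h'; right; rw [← hrest]; exact List.mem_append.mpr (Or.inr h')
              · rintro (h' | h')
                · exact absurd h' hkx
                · rw [← hrest] at h'
                  rcases List.mem_append.mp h' with h'' | h''
                  · exact absurd h'' hkt
                  · exact h''
            have hcount : (x :: rest).count k = r.count k := by
              rw [List.count_cons_of_ne (Ne.symm hkx), ← hrest, List.count_append,
                  List.count_eq_zero.mpr hkt]
              omega
            rw [PySem.Dict.getD_insert]
            simp only [hmem, hcount]
            split
            · rfl
            · simp


-- ===== VERDICT (by name: the statement is the Claim_ definition above) =====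
theorem creation_dictionary_birds_spec : Claim_equal_creation_dictionary_birds := by
  intro p s _
  unfold Spec_creation_dictionary_birds creation_dictionary_birds creation_dictionary_birds_alt
  simp only []
  set dA := p.foldl (fun d i => if i ∈ s then d.insert i (d.getD i 0 + 1) else d)
      (s.foldl (fun d i => d.insert i (0 : Int)) PySem.Dict.empty) with hdA
  set cnts := runCountsAux (PySem.List.sorted p (fun x => x) false) PySem.Dict.empty with hcnts
  set dB := s.foldl (fun d b => d.insert b (cnts.getD b 0)) PySem.Dict.empty with hdB
  have hkA : dA.keys = PySem.Set.ofList s := keys_A p s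
  have hkB : dB.keys = PySem.Set.ofList s := by
    rw [hdB, PySem.Dict.keys_foldl_insert]
    rfl
  have hndA : dA.keys.Nodup := by rw [hkA]; exact PySem.Set.nodup_ofList s
  have hndB : dB.keys.Nodup := by rw [hkB]; exact PySem.Set.nodup_ofList s
  rw [PySem.Dict.items_eq_map_keys dA hndA 0, PySem.Dict.items_eq_map_keys dB hndB 0,
      hkA, hkB]
  refine List.map_congr_left ?_
  intro k hk
  have hks : k ∈ s := (PySem.Set.mem_ofList s k).mp hk
  have hA : dA.getD k 0 = (p.count k : Int) := by
    rw [hdA, foldl_if_filter, PySem.Dict.getD_foldl_insert_add_one,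
        getD_foldl_insert_zero _ _ _ (by simp [PySem.Dict.getD_empty]),
        List.count_filter (by simp [hks])]
    ring
  have hcnt : cnts.getD k 0 = (p.count k : Int) := by
    rw [hcnts, getD_runCountsAux (PySem.List.sorted p (fun x => x) false).length _ le_rfl
          (by simpa using PySem.List.sorted_pairwise p (fun x => x)) PySem.Dict.empty k]
    have hperm := PySem.List.sorted_perm p (fun x => x) false
    by_cases hkp : k ∈ p
    · simp [hperm.mem_iff.mpr hkp, hperm.count_eq]
    · have hmem : k ∉ PySem.List.sorted p (fun x => x) false :=
        fun h => hkp (hperm.mem_iff.mp h)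
      simp [hmem, List.count_eq_zero.mpr hkp, PySem.Dict.getD_empty]
  have hB : dB.getD k 0 = (p.count k : Int) := by
    rw [hdB, getD_foldl_insert_keyfun s (fun b => cnts.getD b 0)]
    simp [hks, hcnt]
  rw [hA, hB]
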